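-- pv_equiv track=rewrite | github.com/janj3143/careertrojan---antigravity | scripts/merge_mined_gazetteers.py | merge_terms
-- ===== SOURCE A (Python) =====
-- def normalize(term):
--     """Normalize a term for dedup: lowercase, strip, collapse spaces."""
--     return " ".join(term.lower().strip().split())
--
-- def merge_terms(existing, new_terms):
--     """Merge new terms into existing, deduplicated, sorted."""
--     seen = set()
--     result = []
--     for t in existing + new_terms:
--         n = normalize(t)
--         if n and n not in seen and len(n.split()) >= 2:
--             seen.add(n)
--             result.append(n)
--     return sorted(result)
-- ===== SOURCE B (Python) =====
-- def normalize(term):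
--     """Normalize a term for dedup: lowercase, strip, collapse spaces."""
--     return " ".join(term.lower().strip().split())
--
-- def merge_terms(existing, new_terms):
--     """Merge: normalize+filter in one pass, sort, then remove adjacent duplicates."""
--     kept = [n for n in map(normalize, existing + new_terms)
--             if n and len(n.split()) >= 2]
--     kept.sort()
--     out = []
--     for n in kept:
--         if not out or out[-1] != n:
--             out.append(n)
--     return out
-- ===== Notes on version B (the rewrite author's own statement) =====
-- stated objective: alternative
-- what changed: Deduplication by hash-set membership during the collection loop is replaced by a filter-map pass, a sort, and a single adjacent-duplicate-removal pass over the sorted list (no set is maintained).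
import Mathlib
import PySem

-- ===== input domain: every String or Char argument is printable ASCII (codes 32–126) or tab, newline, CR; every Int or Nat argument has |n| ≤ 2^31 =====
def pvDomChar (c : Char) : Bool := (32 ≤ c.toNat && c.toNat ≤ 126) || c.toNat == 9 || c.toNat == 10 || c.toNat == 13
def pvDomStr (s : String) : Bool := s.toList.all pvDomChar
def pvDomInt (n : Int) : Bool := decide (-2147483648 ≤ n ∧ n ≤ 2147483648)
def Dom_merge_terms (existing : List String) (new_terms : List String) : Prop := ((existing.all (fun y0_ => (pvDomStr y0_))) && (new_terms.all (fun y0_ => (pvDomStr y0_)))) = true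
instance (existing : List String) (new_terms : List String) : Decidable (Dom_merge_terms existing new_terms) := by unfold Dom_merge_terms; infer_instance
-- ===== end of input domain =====

-- B replaces the set-based dedup loop by map+filter, sort, and one adjacent-duplicate-removal pass (same results, alternative algorithm).

-- shared helper: normalize(term) = " ".join(term.lower().strip().split())
def pvNormalize (term : String) : String :=
  PySem.Str.join " " (PySem.Str.split₀ (PySem.Str.strip (PySem.Str.lower term)))

-- ===== PORT A =====
-- the body of A's 'for t in existing + new_terms' loop, on the state (seen, result)
def pvStepA (st : PySem.Set String × List String) (t : String) : PySem.Set String × List String :=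
  let n := pvNormalize t
  if n ≠ "" ∧ n ∉ st.1 ∧ 2 ≤ (PySem.Str.split₀ n).length then
    (PySem.Set.add st.1 n, st.2 ++ [n])
  else st

def merge_terms (existing : List String) (new_terms : List String) : List String :=
  let st := (existing ++ new_terms).foldl pvStepA (PySem.Set.empty, [])
  PySem.List.sorted st.2 (fun x => x) false

-- ===== PORT B =====
-- the comprehension's filter
def pvKeep (n : String) : Bool := decide (n ≠ "" ∧ 2 ≤ (PySem.Str.split₀ n).length)

-- the body of B's final pass: append n unless it equals out[-1]
def pvStepB (out : List String) (n : String) : List String :=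
  if out = [] ∨ ¬ (PySem.List.pyGetD out (-1) "" = n) then out ++ [n] else out

def merge_terms_alt (existing : List String) (new_terms : List String) : List String :=
  let kept := ((existing ++ new_terms).map pvNormalize).filter pvKeep
  let sortedKept := PySem.List.sorted kept (fun x => x) false
  sortedKept.foldl pvStepB []

-- ===== PRECONDITION & SPEC =====
def Spec_merge_terms (existing : List String) (new_terms : List String) (out : List String) : Prop := out = merge_terms_alt existing new_terms
instance (existing : List String) (new_terms : List String) (out : List String) : Decidable (Spec_merge_terms existing new_terms out) := by unfold Spec_merge_terms; infer_instance

-- ===== CLAIM (what is proved, stated in full; the proofs are below) =====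
def Claim_equal_merge_terms : Prop := ∀ (existing : List String) (new_terms : List String), Dom_merge_terms existing new_terms → Spec_merge_terms existing new_terms (merge_terms existing new_terms)

-- ===== LEMMAS AND PROOFS =====

-- A's loop, generalized over its state: the result list is duplicate-free and holds
-- exactly the previous result plus the kept normalized terms of the remaining input.
theorem pvLoopA (ts : List String) (seen : PySem.Set String) (res : List String)
    (hn : res.Nodup) (hs : ∀ x, x ∈ seen ↔ x ∈ res) :
    (ts.foldl pvStepA (seen, res)).2.Nodup ∧
    (∀ x, x ∈ (ts.foldl pvStepA (seen, res)).2 ↔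
      x ∈ res ∨ x ∈ ((ts.map pvNormalize).filter pvKeep)) := by
  induction ts generalizing seen res with
  | nil => simp [hn]
  | cons t ts ih =>
    rw [List.foldl_cons, List.map_cons]
    by_cases hc : pvNormalize t ≠ "" ∧ pvNormalize t ∉ seen ∧ 2 ≤ (PySem.Str.split₀ (pvNormalize t)).length
    · have hstep : pvStepA (seen, res) t = (PySem.Set.add seen (pvNormalize t), res ++ [pvNormalize t]) := by
        simp only [pvStepA]
        rw [if_pos hc]
      have hk : pvKeep (pvNormalize t) = true := by
        simp only [pvKeep, decide_eq_true_eq]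
        exact ⟨hc.1, hc.2.2⟩
      have hnotres : pvNormalize t ∉ res := fun h => hc.2.1 ((hs _).mpr h)
      have hn' : (res ++ [pvNormalize t]).Nodup := by
        exact hn.append (List.nodup_singleton _) (List.disjoint_singleton.mpr hnotres)
      have hs' : ∀ x, x ∈ PySem.Set.add seen (pvNormalize t) ↔ x ∈ res ++ [pvNormalize t] := by
        intro x
        rw [PySem.Set.mem_add, List.mem_append, List.mem_singleton, hs x]
      rw [hstep]
      obtain ⟨ih1, ih2⟩ := ih (PySem.Set.add seen (pvNormalize t)) (res ++ [pvNormalize t]) hn' hs'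
      refine ⟨ih1, fun x => ?_⟩
      rw [ih2 x, List.filter_cons, if_pos hk]
      simp only [List.mem_append, List.mem_cons, List.not_mem_nil, or_false]
      exact or_assoc
    · have hstep : pvStepA (seen, res) t = (seen, res) := by
        simp only [pvStepA]
        rw [if_neg hc]
      rw [hstep]
      obtain ⟨ih1, ih2⟩ := ih seen res hn hs
      refine ⟨ih1, fun x => ?_⟩
      rw [ih2 x, List.filter_cons]
      by_cases hk : pvKeep (pvNormalize t) = true
      · -- kept by the filter but already seen: pvNormalize t ∈ seen, hence ∈ res
        have hmem : pvNormalize t ∈ res := by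
          have h1 : pvNormalize t ≠ "" ∧ 2 ≤ (PySem.Str.split₀ (pvNormalize t)).length := by
            simpa only [pvKeep, decide_eq_true_eq] using hk
          by_cases h2 : pvNormalize t ∈ seen
          · exact (hs _).mp h2
          · exact absurd ⟨h1.1, h2, h1.2⟩ hc
        rw [if_pos hk]
        simp only [List.mem_cons]
        constructor
        · rintro (h | h)
          · exact Or.inl h
          · exact Or.inr (Or.inr h)
        · rintro (h | h | h)
          · exact Or.inl h
          · exact Or.inl (h ▸ hmem)
          · exact Or.inr h
      · rw [if_neg hk]

-- B's final pass, generalized over its accumulator: on a (≤)-sorted input it returns a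
-- strictly (<)-sorted extension of the accumulator with exactly the input's members added.
theorem pvLoopB (s : List String) (out : List String)
    (hpw : out.Pairwise (· < ·))
    (hlast : ∀ h : out ≠ [], (∀ b ∈ s, out.getLast h ≤ b) ∧ (∀ a ∈ out, a ≤ out.getLast h)) :
    s.Pairwise (· ≤ ·) →
    (s.foldl pvStepB out).Pairwise (· < ·) ∧
    (∀ x, x ∈ s.foldl pvStepB out ↔ x ∈ out ∨ x ∈ s) := by
  intro hs
  induction s generalizing out with
  | nil => exact ⟨hpw, fun x => by simp⟩
  | cons n rest ih =>
    have hle : ∀ b ∈ rest, n ≤ b := (List.pairwise_cons.mp hs).1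
    have hrest : rest.Pairwise (· ≤ ·) := (List.pairwise_cons.mp hs).2
    rw [List.foldl_cons]
    by_cases hnil : out = []
    · subst hnil
      have hstep : pvStepB [] n = [n] := by
        simp [pvStepB]
      rw [hstep]
      have h1 : ([n] : List String).Pairwise (· < ·) := by simp
      have h2 : ∀ h : ([n] : List String) ≠ [],
          (∀ b ∈ rest, ([n] : List String).getLast h ≤ b) ∧
          (∀ a ∈ ([n] : List String), a ≤ ([n] : List String).getLast h) := by
        intro h
        simp only [List.getLast_singleton]
        exact ⟨hle, by simp⟩
      obtain ⟨ih1, ih2⟩ := ih [n] h1 h2 hrest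
      refine ⟨ih1, fun x => ?_⟩
      rw [ih2 x]
      simp only [List.mem_cons, List.not_mem_nil, false_or, or_false]
    · have hget : PySem.List.pyGetD out (-1) "" = out.getLast hnil :=
        PySem.List.pyGetD_neg_one out "" hnil
      by_cases heq : out.getLast hnil = n
      · -- adjacent duplicate: skip
        have hstep : pvStepB out n = out := by
          simp only [pvStepB]
          rw [if_neg]
          rw [hget, heq]
          simp [hnil]
        rw [hstep]
        have h2 : ∀ h : out ≠ [], (∀ b ∈ rest, out.getLast h ≤ b) ∧ (∀ a ∈ out, a ≤ out.getLast h) := by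
          intro h
          refine ⟨fun b hb => ?_, (hlast h).2⟩
          rw [heq]
          exact hle b hb
        obtain ⟨ih1, ih2⟩ := ih out hpw h2 hrest
        refine ⟨ih1, fun x => ?_⟩
        rw [ih2 x]
        have hmem : n ∈ out := heq ▸ List.getLast_mem hnil
        simp only [List.mem_cons]
        constructor
        · rintro (h | h)
          · exact Or.inl h
          · exact Or.inr (Or.inr h)
        · rintro (h | h | h)
          · exact Or.inl h
          · exact Or.inl (h ▸ hmem)
          · exact Or.inr h
      · -- new value: append
        have hstep : pvStepB out n = out ++ [n] := by
          simp only [pvStepB]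
          rw [if_pos]
          right
          rw [hget]
          exact heq
        rw [hstep]
        have hlt : ∀ a ∈ out, a < n := by
          intro a ha
          have h1 : a ≤ out.getLast hnil := (hlast hnil).2 a ha
          have h2 : out.getLast hnil ≤ n := (hlast hnil).1 n (List.mem_cons_self)
          exact lt_of_le_of_lt h1 (lt_of_le_of_ne h2 heq)
        have h1 : (out ++ [n]).Pairwise (· < ·) := by
          rw [List.pairwise_append]
          exact ⟨hpw, by simp, by simpa using hlt⟩
        have h2 : ∀ h : out ++ [n] ≠ [],
            (∀ b ∈ rest, (out ++ [n]).getLast h ≤ b) ∧ (∀ a ∈ out ++ [n], a ≤ (out ++ [n]).getLast h) := by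
          intro h
          rw [List.getLast_concat]
          refine ⟨hle, fun a ha => ?_⟩
          rcases List.mem_append.mp ha with h' | h'
          · exact le_of_lt (hlt a h')
          · rw [List.mem_singleton] at h'
            exact le_of_eq h'
        obtain ⟨ih1, ih2⟩ := ih (out ++ [n]) h1 h2 hrest
        refine ⟨ih1, fun x => ?_⟩
        rw [ih2 x]
        simp only [List.mem_append, List.mem_cons, List.not_mem_nil, or_false]
        exact or_assoc

-- ===== VERDICT (by name: the statement is the Claim_ definition above) =====
theorem merge_terms_spec : Claim_equal_merge_terms := by
  intro existing new_terms _
  unfold Spec_merge_terms merge_terms merge_terms_alt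
  obtain ⟨hAnodup, hAmem⟩ := pvLoopA (existing ++ new_terms) PySem.Set.empty []
    (by simp) (by simp [PySem.Set.empty])
  obtain ⟨hBpw, hBmem⟩ := pvLoopB
    (PySem.List.sorted (((existing ++ new_terms).map pvNormalize).filter pvKeep) (fun x => x) false)
    [] (by simp) (by simp)
    (PySem.List.sorted_pairwise (((existing ++ new_terms).map pvNormalize).filter pvKeep) (fun x => x))
  refine PySem.List.sorted_eq_of_perm_of_pairwise_lt _ _ _ ?_ hBpw
  refine (List.perm_ext_iff_of_nodup (hBpw.imp (fun h => ne_of_lt h)) hAnodup).mpr (fun x => ?_)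
  rw [hBmem x, hAmem x, PySem.List.mem_sorted]
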